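-- pv_equiv track=rewrite | github.com/WiekeHarmsen/multi_seq_align_nl | adagt/deduce_pcus_orig_graph.py | get_pcu_boundaries
-- ===== SOURCE A (Python) =====
-- def get_pcu_boundaries(graphemes_align):
--     begin = 0
--     end = 0
--     span_list = []
--     for i in range(len(graphemes_align)):
--         l = len(graphemes_align[i])
--         end += l
--         span = [begin, end]
--         span_list.append(span)
--         begin = end
--
--     return span_list
-- ===== SOURCE B (Python) =====
-- def get_pcu_boundaries(graphemes_align):
--     # prefix-sum table of grapheme lengths, then pair each end with the previous end
--     ends = [len(g) for g in graphemes_align]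
--     for i in range(1, len(ends)):
--         ends[i] += ends[i - 1]
--     begins = [0] + ends[:-1]
--     return [[b, e] for b, e in zip(begins, ends)]
-- ===== Notes on version B (the rewrite author's own statement) =====
-- stated objective: alternative
-- what changed: Replaces the running begin/end state machine by an in-place prefix-sum table of the lengths followed by a separate pairing pass that zips the ends with their shifted copy.
import Mathlib
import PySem

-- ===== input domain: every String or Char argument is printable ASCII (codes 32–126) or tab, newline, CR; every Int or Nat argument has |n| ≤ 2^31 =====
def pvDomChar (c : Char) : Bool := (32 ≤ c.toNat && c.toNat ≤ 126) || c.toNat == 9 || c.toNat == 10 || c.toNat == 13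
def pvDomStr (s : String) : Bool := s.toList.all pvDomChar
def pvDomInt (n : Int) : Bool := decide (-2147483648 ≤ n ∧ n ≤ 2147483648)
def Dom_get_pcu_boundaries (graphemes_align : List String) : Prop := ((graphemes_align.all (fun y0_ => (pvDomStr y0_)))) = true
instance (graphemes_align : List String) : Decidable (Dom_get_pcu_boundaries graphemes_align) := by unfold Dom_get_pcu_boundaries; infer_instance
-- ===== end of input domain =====

-- B replaces A's running begin/end state machine by an in-place prefix-sum table of the
-- lengths plus a separate pairing pass over the shifted table (alternative decomposition).

-- ===== PORT A =====
def get_pcu_boundaries (graphemes_align : List String) : List (List Int) :=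
  let st := (PySem.List.pyRange 0 (PySem.List.len graphemes_align) 1).foldl
    (fun (st : Int × Int × List (List Int)) i =>
      let l := PySem.Str.len (PySem.List.pyGetD graphemes_align i "")
      let e := st.2.1 + l
      (e, e, st.2.2 ++ [[st.1, e]]))
    (0, 0, [])
  st.2.2

-- ===== PORT B =====
def get_pcu_boundaries_alt (graphemes_align : List String) : List (List Int) :=
  let ends0 := graphemes_align.map PySem.Str.len
  let ends := (PySem.List.pyRange 1 (PySem.List.len ends0) 1).foldl
    (fun es i => PySem.List.pySetD es i (PySem.List.pyGetD es i 0 + PySem.List.pyGetD es (i - 1) 0))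
    ends0
  let begins := 0 :: PySem.List.slice ends none (some (-1))
  (begins.zip ends).map (fun p => [p.1, p.2])

-- ===== PRECONDITION & SPEC =====
def Spec_get_pcu_boundaries (graphemes_align : List String) (out : List (List Int)) : Prop := out = get_pcu_boundaries_alt graphemes_align
instance (graphemes_align : List String) (out : List (List Int)) : Decidable (Spec_get_pcu_boundaries graphemes_align out) := by unfold Spec_get_pcu_boundaries; infer_instance

-- ===== CLAIM (what is proved, stated in full; the proofs are below) =====
def Claim_equal_get_pcu_boundaries : Prop := ∀ (graphemes_align : List String), Dom_get_pcu_boundaries graphemes_align → Spec_get_pcu_boundaries graphemes_align (get_pcu_boundaries graphemes_align)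

-- ===== LEMMAS AND PROOFS =====

/-- Reference: spans from a list of lengths starting at `b`. -/
def pvSpans (b : Int) : List Int → List (List Int)
  | [] => []
  | l :: ls => [b, b + l] :: pvSpans (b + l) ls

/-- Reference: prefix sums starting from `b`. -/
def pvScan (b : Int) : List Int → List Int
  | [] => []
  | l :: ls => (b + l) :: pvScan (b + l) ls

theorem pvScan_length (b : Int) (ls : List Int) : (pvScan b ls).length = ls.length := by
  induction ls generalizing b with
  | nil => rfl
  | cons l ls ih => simp [pvScan, ih]

theorem pvSpans_append (b : Int) (xs : List Int) (l : Int) :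
    pvSpans b (xs ++ [l]) = pvSpans b xs ++ [[b + xs.sum, b + xs.sum + l]] := by
  induction xs generalizing b with
  | nil => simp [pvSpans]
  | cons x xs ih => simp [pvSpans, ih, add_assoc]

theorem pvScan_getD (b : Int) (xs : List Int) (k : Nat) (h : k < xs.length) :
    (pvScan b xs).getD k 0 = b + (xs.take (k + 1)).sum := by
  induction xs generalizing b k with
  | nil => simp at h
  | cons l ls ih =>
    cases k with
    | zero => simp [pvScan]
    | succ k =>
      simp only [pvScan, List.getD_cons_succ, List.take_succ_cons, List.sum_cons]
      rw [ih (b + l) k (by simpa using h)]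
      ring

theorem pvScan_take (b : Int) (ls : List Int) (m : Nat) :
    pvScan b (ls.take (m + 1)) ++ ls.drop (m + 1) =
      (pvScan b (ls.take m) ++ ls.drop m).set m (b + (ls.take (m + 1)).sum) := by
  induction ls generalizing b m with
  | nil => simp [pvScan]
  | cons l ls ih =>
    cases m with
    | zero => simp [pvScan]
    | succ m =>
      simp only [List.take_succ_cons, List.drop_succ_cons, pvScan, List.cons_append,
        List.set_cons_succ, List.sum_cons]
      rw [ih (b + l) m]
      congr 2
      ring

-- ---- A-side characterisation ----

theorem portA_fold (gs : List String) :
    ((PySem.List.pyRange 0 (PySem.List.len gs) 1).foldl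
      (fun (st : Int × Int × List (List Int)) i =>
        let l := PySem.Str.len (PySem.List.pyGetD gs i "")
        let e := st.2.1 + l
        (e, e, st.2.2 ++ [[st.1, e]]))
      (0, 0, [])) =
    ((gs.map PySem.Str.len).sum, (gs.map PySem.Str.len).sum, pvSpans 0 (gs.map PySem.Str.len)) := by
  induction gs using List.reverseRecOn with
  | nil => rfl
  | append_singleton xs x ih =>
    have hlen : PySem.List.len (xs ++ [x]) = (PySem.List.len xs) + 1 := by
      simp [PySem.List.len_eq]
    rw [hlen, PySem.List.pyRange_one_succ_right (by simp [PySem.List.len_eq]),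
        List.foldl_append]
    have hcongr :
        ((PySem.List.pyRange 0 (PySem.List.len xs) 1).foldl
          (fun (st : Int × Int × List (List Int)) i =>
            let l := PySem.Str.len (PySem.List.pyGetD (xs ++ [x]) i "")
            let e := st.2.1 + l
            (e, e, st.2.2 ++ [[st.1, e]]))
          (0, 0, [])) =
        ((PySem.List.pyRange 0 (PySem.List.len xs) 1).foldl
          (fun (st : Int × Int × List (List Int)) i =>
            let l := PySem.Str.len (PySem.List.pyGetD xs i "")
            let e := st.2.1 + l
            (e, e, st.2.2 ++ [[st.1, e]]))
          (0, 0, [])) := by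
      apply PySem.List.foldl_congr_mem
      intro acc i hi
      rw [PySem.List.mem_pyRange_one] at hi
      obtain ⟨h0, h1⟩ := hi
      have h1' : i < (xs.length : Int) := by simpa [PySem.List.len_eq] using h1
      have hi' : i = ((i.toNat : Nat) : Int) := by omega
      rw [hi', PySem.List.pyGetD_natCast, PySem.List.pyGetD_natCast]
      have hg : (xs ++ [x]).getD i.toNat "" = xs.getD i.toNat "" := by
        rw [List.getD_eq_getElem?_getD, List.getD_eq_getElem?_getD,
            List.getElem?_append_left (by omega)]
      rw [hg]
    rw [hcongr, ih]
    simp only [List.foldl_cons, List.foldl_nil]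
    simp [List.map_append, List.sum_append, pvSpans_append]

theorem portA_eq (gs : List String) :
    get_pcu_boundaries gs = pvSpans 0 (gs.map PySem.Str.len) := by
  simp only [get_pcu_boundaries, portA_fold]

-- ---- B-side characterisation ----

theorem portB_fold (ls : List Int) (m : Nat) (hm : 1 ≤ m) (hlen : m ≤ ls.length) :
    ((PySem.List.pyRange 1 (m : Int) 1).foldl
      (fun es i => PySem.List.pySetD es i (PySem.List.pyGetD es i 0 + PySem.List.pyGetD es (i - 1) 0))
      ls) = pvScan 0 (ls.take m) ++ ls.drop m := by
  induction m with
  | zero => omega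
  | succ m ih =>
    by_cases h1 : 1 ≤ m
    case neg =>
      have hm0 : m = 0 := by omega
      subst hm0
      rcases ls with _ | ⟨l, ls⟩
      · simp at hlen
      · simp [PySem.List.pyRange_one_eq_nil, pvScan]
    case pos =>
      rw [show ((m + 1 : Nat) : Int) = (m : Int) + 1 from by push_cast; ring,
          PySem.List.pyRange_one_succ_right (by exact_mod_cast h1), List.foldl_append,
          ih h1 (by omega)]
      have hmlt : m < ls.length := by omega
      have hA : (pvScan 0 (ls.take m)).length = m := by
        rw [pvScan_length, List.length_take]; omega
      simp only [List.foldl_cons, List.foldl_nil]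
      have hget_m : PySem.List.pyGetD (pvScan 0 (ls.take m) ++ ls.drop m) ((m : Nat) : Int) 0
          = ls.getD m 0 := by
        rw [PySem.List.pyGetD_natCast, List.getD_eq_getElem?_getD,
            List.getElem?_append_right (le_of_eq hA), hA, List.getD_eq_getElem?_getD]
        simp [List.getElem?_drop]
      have hc : ((m : Int) - 1) = (((m - 1 : Nat)) : Int) := by omega
      have hget_m1 : PySem.List.pyGetD (pvScan 0 (ls.take m) ++ ls.drop m) ((m : Int) - 1) 0
          = (ls.take m).sum := by
        rw [hc, PySem.List.pyGetD_natCast, List.getD_eq_getElem?_getD,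
            List.getElem?_append_left (by omega), ← List.getD_eq_getElem?_getD,
            pvScan_getD _ _ _ (by rw [List.length_take]; omega)]
        rw [show (m - 1) + 1 = m from by omega]
        simp [List.take_take]
      have hsum : (ls.take (m + 1)).sum = (ls.take m).sum + ls.getD m 0 := by
        rw [List.take_succ, List.sum_append, List.getElem?_eq_getElem hmlt,
            List.getD_eq_getElem?_getD, List.getElem?_eq_getElem hmlt]
        simp
      have hv : ls.getD m 0 + (ls.take m).sum = 0 + (ls.take (m + 1)).sum := by
        rw [hsum]; ring
      rw [hget_m, hget_m1, hv, PySem.List.pySetD_natCast, pvScan_take 0 ls m]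

theorem pvPair (b : Int) (ls : List Int) :
    ((b :: (pvScan b ls).dropLast).zip (pvScan b ls)).map (fun p : Int × Int => [p.1, p.2])
      = pvSpans b ls := by
  induction ls generalizing b with
  | nil => simp [pvScan, pvSpans]
  | cons l ls ih =>
    cases ls with
    | nil => simp [pvScan, pvSpans]
    | cons l2 rest =>
      have h := ih (b + l)
      simp only [pvScan, pvSpans, List.dropLast_cons₂, List.zip_cons_cons, List.map_cons] at h ⊢
      rw [List.cons_eq_cons]
      exact ⟨rfl, h⟩

theorem portB_eq (gs : List String) :
    get_pcu_boundaries_alt gs = pvSpans 0 (gs.map PySem.Str.len) := by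
  cases gs with
  | nil => rfl
  | cons g gs' =>
    have hfold := portB_fold ((g :: gs').map PySem.Str.len) ((g :: gs').map PySem.Str.len).length
      (by simp) (le_refl _)
    simp only [get_pcu_boundaries_alt, PySem.List.len_eq, PySem.List.slice_to_neg_one]
    rw [hfold, List.take_length, List.drop_length, List.append_nil]
    exact pvPair 0 _

-- ===== VERDICT (by name: the statement is the Claim_ definition above) =====
theorem get_pcu_boundaries_spec : Claim_equal_get_pcu_boundaries := by
  intro gs _
  unfold Spec_get_pcu_boundaries
  rw [portA_eq, portB_eq]
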